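-- pv_equiv track=rewrite | github.com/ii0001e/python1 | Just a python project for studing/Klassitöö + kodutöö 7.02.2023/klassitoo7vebr_mod.py | kustuta
-- ===== SOURCE A (Python) =====
-- def kustuta(nimi:str,p:list,i:list):
--     n=i.count(nimi)
--     pos=0
--     for j in range(n):
--         ind=i.index(nimi,pos)
--         pos=ind
--         i.remove(nimi)
--         p.pop(ind)
--     return p,i
-- ===== SOURCE B (Python) =====
-- def kustuta(nimi: str, p: list, i: list):
--     for k in range(len(i) - 1, -1, -1):
--         if i[k] == nimi:
--             del i[k]
--             del p[k]
--     return p, i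
-- ===== Notes on version B (the rewrite author's own statement) =====
-- stated objective: simpler
-- what changed: Replaced A's count/index(start)/remove/pop machinery (repeated forward scans with a moving start position) by a single reverse index pass that deletes i[k] and p[k] in place whenever i[k]==nimi.
import Mathlib
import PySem

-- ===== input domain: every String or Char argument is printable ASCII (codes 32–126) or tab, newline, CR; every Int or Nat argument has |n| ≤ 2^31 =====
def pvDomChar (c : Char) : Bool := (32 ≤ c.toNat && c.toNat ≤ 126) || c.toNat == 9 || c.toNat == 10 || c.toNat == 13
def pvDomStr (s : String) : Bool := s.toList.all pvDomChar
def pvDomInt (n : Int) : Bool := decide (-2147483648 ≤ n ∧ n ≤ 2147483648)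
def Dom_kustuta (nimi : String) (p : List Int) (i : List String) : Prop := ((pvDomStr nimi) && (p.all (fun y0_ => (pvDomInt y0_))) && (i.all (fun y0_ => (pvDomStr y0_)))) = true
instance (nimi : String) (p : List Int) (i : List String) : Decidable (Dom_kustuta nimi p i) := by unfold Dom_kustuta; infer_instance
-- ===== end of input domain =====

-- B replaces A's count/index/remove/pop machinery by one reverse in-place pass deleting aligned
-- entries (simpler; both mutate p and i in place in Python — the equivalence proved here is about
-- the returned pair, and the ports are pure).

-- ===== PORT A =====
-- one iteration of A's 'for j in range(n)' body, recursing on the remaining iteration count;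
-- state (p, i, pos) as in A.  i.index(nimi, pos) is ported as index? on i.drop pos shifted by pos
-- (exact for a nonnegative in-range start, which pos always is).  The 'none' fallthroughs keep the
-- state: in Python those are a ValueError (unreachable: the loop runs count-many times) and the
-- IndexError of p.pop(ind) (excluded by Pre_kustuta).
def kustutaLoopA (nimi : String) : Nat → List Int → List String → Nat → List Int × List String
  | 0, p, i, _ => (p, i)
  | n + 1, p, i, pos =>
    match (PySem.List.index? (i.drop pos) nimi).map (· + pos) with
    | none => (p, i)
    | some ind =>
      let i' := match PySem.List.remove? i nimi with
        | none => i
        | some t => t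
      match PySem.List.pop? p (ind : Int) with
      | none => kustutaLoopA nimi n p i' ind
      | some r => kustutaLoopA nimi n r.2 i' ind

def kustuta (nimi : String) (p : List Int) (i : List String) : List Int × List String :=
  kustutaLoopA nimi (PySem.List.count i nimi) p i 0

-- ===== PORT B =====
-- Source B's 'for k in range(len(i)-1, -1, -1)': recursion on k counting down; i[k] is always in
-- range, so getD is exact; 'del p[k]' is guarded (its IndexError is excluded by Pre_kustuta).
def kustutaAltLoop (nimi : String) : Nat → List Int → List String → List Int × List String
  | 0, p, i => (p, i)
  | k + 1, p, i =>
    if i.getD k "" = nimi then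
      kustutaAltLoop nimi k (if k < p.length then p.eraseIdx k else p) (i.eraseIdx k)
    else
      kustutaAltLoop nimi k p i

def kustuta_alt (nimi : String) (p : List Int) (i : List String) : List Int × List String :=
  kustutaAltLoop nimi i.length p i

-- ===== PRECONDITION & SPEC =====
-- Pre_ excludes exactly the inputs where BOTH Pythons raise IndexError: an occurrence of nimi in i
-- at an index ≥ len(p) makes A's p.pop(ind) and B's del p[k] raise.
def Pre_kustuta (nimi : String) (p : List Int) (i : List String) : Prop :=
  ∀ k, k < i.length → i.getD k "" = nimi → k < p.length
instance (nimi : String) (p : List Int) (i : List String) : Decidable (Pre_kustuta nimi p i) := by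
  unfold Pre_kustuta; infer_instance

def pvWitness_kustuta : String × List Int × List String := ("ab", [3, 4, 5], ["x", "ab", "y"])

def Spec_kustuta (nimi : String) (p : List Int) (i : List String) (out : List Int × List String) : Prop := out = kustuta_alt nimi p i
instance (nimi : String) (p : List Int) (i : List String) (out : List Int × List String) : Decidable (Spec_kustuta nimi p i out) := by unfold Spec_kustuta; infer_instance

-- ===== CLAIM (what is proved, stated in full; the proofs are below) =====
def Claim_equal_kustuta : Prop := ∀ (nimi : String) (p : List Int) (i : List String), Dom_kustuta nimi p i → Pre_kustuta nimi p i → Spec_kustuta nimi p i (kustuta nimi p i)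

-- ===== LEMMAS AND PROOFS =====

-- the common value of the p-component: keep p[k] when i[k] ≠ nimi (positions past i kept)
def keepP (nimi : String) : List Int → List String → List Int
  | p, [] => p
  | [], _ :: _ => []
  | a :: q, x :: is => if x = nimi then keepP nimi q is else a :: keepP nimi q is

theorem keepP_nil_right (nimi : String) (p : List Int) : keepP nimi p [] = p := by
  cases p <;> rfl

theorem keepP_not_mem (nimi : String) (p : List Int) (i : List String) (h : nimi ∉ i) :
    keepP nimi p i = p := by
  induction i generalizing p with
  | nil => exact keepP_nil_right nimi p
  | cons x is ih =>
    cases p with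
    | nil => rfl
    | cons a q =>
      simp only [keepP]
      rw [if_neg (by rintro rfl; exact h (List.mem_cons_self))]
      rw [ih q (fun hm => h (List.mem_cons_of_mem _ hm))]

theorem keepP_concat_ne (nimi x : String) (p : List Int) (j : List String) (hx : x ≠ nimi) :
    keepP nimi p (j ++ [x]) = keepP nimi p j := by
  induction j generalizing p with
  | nil =>
    cases p with
    | nil => rfl
    | cons a q => simp [keepP, if_neg hx]
  | cons y js ih =>
    cases p with
    | nil => rfl
    | cons a q => simp only [List.cons_append, keepP]; split_ifs <;> simp [ih]

theorem keepP_concat_eq (nimi : String) (p : List Int) (j : List String)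
    (h : j.length < p.length) :
    keepP nimi (p.eraseIdx j.length) j = keepP nimi p (j ++ [nimi]) := by
  induction j generalizing p with
  | nil =>
    cases p with
    | nil => simp at h
    | cons a q => simp [keepP]
  | cons y js ih =>
    cases p with
    | nil => simp at h
    | cons a q =>
      simp only [List.length_cons, List.eraseIdx_cons_succ, List.cons_append, keepP]
      have hq : js.length < q.length := by simpa using h
      split_ifs <;> simp [ih q hq]

theorem keepP_erase_mid (nimi : String) (p : List Int) (a b : List String)
    (ha : nimi ∉ a) (hlen : a.length < p.length) :
    keepP nimi (p.eraseIdx a.length) (a ++ b) = keepP nimi p (a ++ nimi :: b) := by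
  induction a generalizing p with
  | nil =>
    cases p with
    | nil => simp at hlen
    | cons c q => simp [keepP]
  | cons y as ih =>
    cases p with
    | nil => simp at hlen
    | cons c q =>
      have hy : y ≠ nimi := by rintro rfl; exact ha List.mem_cons_self
      simp only [List.length_cons, List.eraseIdx_cons_succ, List.cons_append, keepP,
        if_neg hy]
      have : as.length < q.length := by simpa using hlen
      rw [ih q (fun hm => ha (List.mem_cons_of_mem _ hm)) this]

theorem remove?_first (nimi : String) (a b : List String) (ha : nimi ∉ a) :
    PySem.List.remove? (a ++ nimi :: b) nimi = some (a ++ b) := by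
  induction a with
  | nil => simp
  | cons y as ih =>
    have hy : y ≠ nimi := by rintro rfl; exact ha List.mem_cons_self
    simp only [List.cons_append]
    rw [PySem.List.remove?_cons_of_ne _ hy, ih (fun hm => ha (List.mem_cons_of_mem _ hm))]
    rfl

-- B's loop only reads/edits indices < n, so a suffix passes through untouched
theorem altLoop_append (nimi : String) (n : Nat) :
    ∀ (j s : List String) (p : List Int), n ≤ j.length →
      kustutaAltLoop nimi n p (j ++ s) =
        ((kustutaAltLoop nimi n p j).1, (kustutaAltLoop nimi n p j).2 ++ s) := by
  induction n with
  | zero => intro j s p _; rfl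
  | succ n ih =>
    intro j s p hn
    have hlt : n < j.length := hn
    have hget : (j ++ s).getD n "" = j.getD n "" := by
      simp [List.getD, List.getElem?_append_left hlt]
    have herase : (j ++ s).eraseIdx n = j.eraseIdx n ++ s :=
      List.eraseIdx_append_of_lt_length hlt s
    simp only [kustutaAltLoop, hget, herase]
    split_ifs with h
    all_goals first
      | exact ih (j.eraseIdx n) s _ (by rw [List.length_eraseIdx_of_lt hlt]; omega)
      | exact ih j s p (le_of_lt hlt)

theorem altLoop_eq (nimi : String) :
    ∀ (i : List String) (p : List Int), Pre_kustuta nimi p i →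
      kustutaAltLoop nimi i.length p i = (keepP nimi p i, i.filter (· ≠ nimi)) := by
  intro i
  induction i using List.reverseRecOn with
  | nil => intro p _; simp [kustutaAltLoop, keepP]
  | append_singleton j x ih =>
    intro p hpre
    have hget : (j ++ [x]).getD j.length "" = x := by
      simp [List.getD]
    have hlen : (j ++ [x]).length = j.length + 1 := by simp
    rw [hlen]
    simp only [kustutaAltLoop, hget]
    by_cases hx : x = nimi
    · subst hx
      have hjp : j.length < p.length := by
        apply hpre j.length (by simp)
        simp
      have herase : (j ++ [x]).eraseIdx j.length = j := by
        rw [List.eraseIdx_append_of_length_le (le_refl j.length)]; simp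
      rw [if_pos rfl, if_pos hjp, herase]
      have hpre' : Pre_kustuta x (p.eraseIdx j.length) j := by
        intro k hk hkv
        have h1 : k < (j ++ [x]).length := by simp; omega
        have h2 : (j ++ [x]).getD k "" = x := by
          simpa [List.getD, List.getElem?_append_left hk] using hkv
        have := hpre k h1 h2
        rw [List.length_eraseIdx_of_lt hjp]; omega
      rw [ih _ hpre', keepP_concat_eq x p j hjp]
      simp
    · rw [if_neg hx, altLoop_append nimi j.length j [x] p (le_refl _)]
      have hpre' : Pre_kustuta nimi p j := by
        intro k hk hkv
        refine hpre k (by simp; omega) ?_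
        simpa [List.getD, List.getElem?_append_left hk] using hkv
      rw [ih p hpre', keepP_concat_ne nimi x p j hx]
      simp [hx]

theorem loopA_eq (nimi : String) :
    ∀ (c : Nat) (i : List String) (p : List Int) (pos : Nat),
      PySem.List.count i nimi = c → pos ≤ i.length → nimi ∉ i.take pos →
      Pre_kustuta nimi p i →
      kustutaLoopA nimi c p i pos = (keepP nimi p i, i.filter (· ≠ nimi)) := by
  intro c
  induction c with
  | zero =>
    intro i p pos hc _ _ _
    have hnm : nimi ∉ i := by
      rw [← List.count_eq_zero]; simpa [PySem.List.count] using hc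
    have hfil : List.filter (fun x => decide (x ≠ nimi)) i = i := by
      rw [List.filter_eq_self]
      intro x hx
      simp only [ne_eq, decide_eq_true_eq]
      rintro rfl; exact hnm hx
    simp only [kustutaLoopA]
    rw [keepP_not_mem nimi p i hnm, hfil]
  | succ c ih =>
    intro i p pos hc hpos htake hpre
    have hcnt : 0 < i.count nimi := by
      have := hc; simp only [PySem.List.count] at this; omega
    have hmem : nimi ∈ i := List.count_pos_iff.mp hcnt
    have hmemdrop : nimi ∈ i.drop pos := by
      have hsplit : nimi ∈ i.take pos ++ i.drop pos := by
        rw [List.take_append_drop]; exact hmem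
      rcases List.mem_append.mp hsplit with h | h
      · exact absurd h htake
      · exact h
    obtain ⟨m, hm⟩ := Option.isSome_iff_exists.mp
      ((PySem.List.index?_isSome_iff (i.drop pos) nimi).mpr hmemdrop)
    obtain ⟨pre, suf, hdecomp, hplen, hpre_nm⟩ := (PySem.List.index?_eq_some_iff _ _ _).mp hm
    -- i = (i.take pos ++ pre) ++ nimi :: suf
    have hi : i = (i.take pos ++ pre) ++ nimi :: suf := by
      conv_lhs => rw [← List.take_append_drop pos i]
      rw [hdecomp, List.append_assoc]
    set a := i.take pos ++ pre with ha
    have hna : nimi ∉ a := by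
      intro h; rcases List.mem_append.mp h with h | h
      · exact htake h
      · exact hpre_nm h
    have halen : a.length = pos + m := by
      rw [ha, List.length_append, List.length_take, hplen, Nat.min_eq_left hpos]
    have hind : a.length < p.length := by
      apply hpre a.length (by rw [hi]; simp)
      rw [hi]
      simp [List.getD]
    -- evaluate one iteration
    have hm' : (PySem.List.index? (i.drop pos) nimi).map (· + pos) = some a.length := by
      rw [hm]; simp only [Option.map_some, Option.some.injEq]; omega
    have hremove : PySem.List.remove? i nimi = some (a ++ suf) := by
      conv_lhs => rw [hi]
      exact remove?_first nimi a suf hna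
    have hpop := PySem.List.pop?_natCast p a.length hind
    simp only [kustutaLoopA, hm', hremove, hpop]
    -- recursive call on (a ++ suf) with pos = a.length
    have hcount : PySem.List.count (a ++ suf) nimi = c := by
      have h1 : PySem.List.count i nimi = c + 1 := hc
      rw [hi] at h1
      simp only [PySem.List.count, List.count_append, List.count_cons_self] at h1 ⊢
      have : List.count nimi a = 0 := List.count_eq_zero.mpr hna
      omega
    have htake' : nimi ∉ (a ++ suf).take a.length := by
      rw [List.take_append_of_le_length (le_refl a.length), List.take_length]
      exact hna
    have hpre' : Pre_kustuta nimi (p.eraseIdx a.length) (a ++ suf) := by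
      intro k hk hkv
      rw [List.length_eraseIdx_of_lt hind]
      rcases lt_or_ge k a.length with hka | hka
      · exfalso
        apply hna
        have h2 : a[k] = nimi := by
          simpa [List.getD, List.getElem?_append_left hka,
            List.getElem?_eq_getElem hka] using hkv
        exact h2 ▸ List.getElem_mem hka
      · -- occurrence in suf: corresponds to index k+1 in i
        have hks : k - a.length < suf.length := by
          have : k < a.length + suf.length := by simpa using hk
          omega
        have hksv : suf.getD (k - a.length) "" = nimi := by
          simpa [List.getD, List.getElem?_append_right hka] using hkv
        have hik : (k + 1) < i.length := by rw [hi]; simp; omega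
        have hikv : i.getD (k + 1) "" = nimi := by
          rw [hi]
          have h1 : a.length ≤ k + 1 := by omega
          rcases Nat.eq_or_lt_of_le h1 with h2 | h2
          · omega
          · have h3 : (k + 1) - a.length = (k - a.length) + 1 := by omega
            simp only [List.getD, List.getElem?_append_right h1, h3,
              List.getElem?_cons_succ]
            simpa [List.getD] using hksv
        have := hpre (k + 1) hik hikv
        omega
    rw [ih (a ++ suf) (p.eraseIdx a.length) a.length hcount (by simp) htake' hpre']
    rw [keepP_erase_mid nimi p a suf hna hind, ← hi]
    have hfil : (a ++ suf).filter (· ≠ nimi) = i.filter (· ≠ nimi) := by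
      rw [hi]; simp
    rw [hfil]

-- ===== VERDICT (by name: the statement is the Claim_ definition above) =====
theorem kustuta_spec : Claim_equal_kustuta := by
  intro nimi p i _ hpre
  unfold Spec_kustuta kustuta kustuta_alt
  rw [loopA_eq nimi (PySem.List.count i nimi) i p 0 rfl (Nat.zero_le _) (by simp) hpre]
  rw [altLoop_eq nimi i p hpre]
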